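-- pv_equiv track=rewrite | github.com/yskang/AlgorithmPractice | baekjoon/python/messi_an_gimossi_17355.py | solution
-- ===== SOURCE A (Python) =====
-- from collections import defaultdict
--
-- MOD = 1000000007
--
-- def prime_factorization(n: int, primes: defaultdict, cache: list):
--     num = n
--     i = 2
--     factors = []
--     while i * i <= n:
--         if n % i:
--             i += 1
--         else:
--             n //= i
--             primes[i] += 1
--             factors.append(i)
--     if n > 1:
--         primes[n] += 1
--         factors.append(n)
--     cache[num] = factors
--
-- def solution(ps: list):
--     ups = defaultdict(lambda: 0)
--     downs = defaultdict(lambda: 0)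
--     cache = defaultdict(lambda: [])
--
--     for a, b in ps:
--         if cache[b-a]:
--             for prime in cache[b-a]:
--                 ups[prime] += 1
--         else:
--             prime_factorization(b-a, ups, cache)
--
--         if cache[b]:
--             for prime in cache[b]:
--                 downs[prime] += 1
--         else:
--             prime_factorization(b, downs, cache)
--
--     for prime in downs:
--         if ups[prime] >= downs[prime]:
--             ups[prime] -= downs[prime]
--             downs[prime] = 0
--         else:
--             downs[prime] -= ups[prime]
--             ups[prime] = 0
--
--     up, down = 1, 1
--     for prime in ups:
--         for _ in range(ups[prime]):
--             up = (up * (prime % MOD)) % MOD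
--     for prime in downs:
--         for _ in range(downs[prime]):
--             down = (down * (prime % MOD)) % MOD
--
--     return '{} {}'.format(up, down)
-- ===== SOURCE B (Python) =====
-- MOD = 1000000007
--
--
-- def solution(ps: list):
--     # No factorization at all: build the exact numerator/denominator products,
--     # reduce the fraction by one Euclidean gcd, then take each part mod MOD.
--     num = 1
--     den = 1
--     for a, b in ps:
--         d = b - a
--         if d > 1:
--             num *= d
--         if b > 1:
--             den *= b
--     g, r = num, den
--     while r:
--         g, r = r, g % r
--     return '{} {}'.format(num // g % MOD, den // g % MOD)
-- ===== Notes on version B (the rewrite author's own statement) =====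
-- stated objective: alternative
-- what changed: B does no factorization at all: it multiplies the raw values b-a (when >1) and b (when >1) into two exact big-integer products, reduces the fraction once with a hand-rolled Euclidean gcd, and outputs each reduced part mod 1e9+7 — replacing A's per-value trial division, prime counters, cache and cancellation pass (prime cancellation of two prime multisets equals dividing both products by their gcd).
import Mathlib
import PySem

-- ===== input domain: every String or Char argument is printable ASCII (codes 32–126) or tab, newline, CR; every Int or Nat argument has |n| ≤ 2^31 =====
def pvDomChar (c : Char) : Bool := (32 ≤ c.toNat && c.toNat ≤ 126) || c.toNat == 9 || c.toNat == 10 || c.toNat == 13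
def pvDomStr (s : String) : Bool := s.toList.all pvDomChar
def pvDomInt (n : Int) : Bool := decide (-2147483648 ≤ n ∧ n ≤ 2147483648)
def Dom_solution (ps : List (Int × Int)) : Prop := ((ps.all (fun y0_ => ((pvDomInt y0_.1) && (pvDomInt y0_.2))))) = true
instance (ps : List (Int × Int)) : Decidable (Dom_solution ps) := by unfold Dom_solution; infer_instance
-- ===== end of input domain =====

-- B does no factorization: it builds the exact numerator/denominator products, reduces them by one
-- Euclidean gcd and takes each part mod 1e9+7 (objective: alternative algorithm, same return value).

def pvMOD : Int := 1000000007

-- ===== PORT A =====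
-- while loop of prime_factorization: returns (final n, primes, factors); fuel n.toNat+2 only
-- makes the recursion total, it is never exhausted (each step consumes fuel, and the loop does
-- at most sqrt(n)+log2(n) steps).
def pvPfLoopA (fuel : Nat) (i n : Int) (primes : PySem.Dict Int Int) (factors : List Int) :
    Int × PySem.Dict Int Int × List Int :=
  match fuel with
  | 0 => (n, primes, factors)
  | fuel + 1 =>
    if i * i ≤ n then
      if PySem.Int.mod n i ≠ 0 then
        pvPfLoopA fuel (i + 1) n primes factors
      else
        pvPfLoopA fuel i (PySem.Int.floordiv n i) (primes.modify i 0 (· + 1)) (factors ++ [i])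
    else (n, primes, factors)

-- prime_factorization(n, primes, cache): mutates primes and sets cache[n] = factors
def pvPrimeFactorizationA (n : Int) (primes : PySem.Dict Int Int)
    (cache : PySem.Dict Int (List Int)) :
    PySem.Dict Int Int × PySem.Dict Int (List Int) :=
  let r := pvPfLoopA (n.toNat + 2) 2 n primes []
  if r.1 > 1 then (r.2.1.modify r.1 0 (· + 1), cache.insert n (r.2.2 ++ [r.1]))
  else (r.2.1, cache.insert n r.2.2)

def solution (ps : List (Int × Int)) : String :=
  let st := ps.foldl
    (fun (st : PySem.Dict Int Int × PySem.Dict Int Int × PySem.Dict Int (List Int)) ab =>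
      let uc :=
        if st.2.2.getD (ab.2 - ab.1) [] ≠ [] then
          ((st.2.2.getD (ab.2 - ab.1) []).foldl (fun d p => d.modify p 0 (· + 1)) st.1, st.2.2)
        else pvPrimeFactorizationA (ab.2 - ab.1) st.1 st.2.2
      let dc :=
        if uc.2.getD ab.2 [] ≠ [] then
          ((uc.2.getD ab.2 []).foldl (fun d p => d.modify p 0 (· + 1)) st.2.1, uc.2)
        else pvPrimeFactorizationA ab.2 st.2.1 uc.2
      (uc.1, dc.1, dc.2))
    (PySem.Dict.empty, PySem.Dict.empty, PySem.Dict.empty)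
  -- 'for prime in downs': the loop body overwrites values of existing keys only, so the key
  -- view iterated over is the key list at loop entry.
  let ud := st.2.1.keys.foldl
    (fun (ud : PySem.Dict Int Int × PySem.Dict Int Int) p =>
      if ud.1.getD p 0 ≥ ud.2.getD p 0 then
        (ud.1.insert p (ud.1.getD p 0 - ud.2.getD p 0), ud.2.insert p 0)
      else
        (ud.1.insert p 0, ud.2.insert p (ud.2.getD p 0 - ud.1.getD p 0)))
    (st.1, st.2.1)
  let up := ud.1.keys.foldl
    (fun u p => (PySem.List.pyRange 0 (ud.1.getD p 0) 1).foldl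
      (fun u _ => PySem.Int.mod (u * PySem.Int.mod p pvMOD) pvMOD) u) 1
  let down := ud.2.keys.foldl
    (fun u p => (PySem.List.pyRange 0 (ud.2.getD p 0) 1).foldl
      (fun u _ => PySem.Int.mod (u * PySem.Int.mod p pvMOD) pvMOD) u) 1
  PySem.Int.toStr up ++ " " ++ PySem.Int.toStr down

-- ===== PORT B =====
-- 'while r: g, r = r, g % r' — fuel r.toNat+2 only makes the recursion total (r strictly
-- decreases each iteration), it is never exhausted.
def pvGcdLoop (fuel : Nat) (g r : Int) : Int :=
  match fuel with
  | 0 => g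
  | fuel + 1 => if r ≠ 0 then pvGcdLoop fuel r (PySem.Int.mod g r) else g

def solution_alt (ps : List (Int × Int)) : String :=
  let nd := ps.foldl
    (fun (nd : Int × Int) ab =>
      let d := ab.2 - ab.1
      (if d > 1 then nd.1 * d else nd.1, if ab.2 > 1 then nd.2 * ab.2 else nd.2))
    (1, 1)
  let g := pvGcdLoop (nd.2.toNat + 2) nd.1 nd.2
  PySem.Int.toStr (PySem.Int.mod (PySem.Int.floordiv nd.1 g) pvMOD) ++ " " ++
    PySem.Int.toStr (PySem.Int.mod (PySem.Int.floordiv nd.2 g) pvMOD)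

-- ===== PRECONDITION & SPEC =====
def Spec_solution (ps : List (Int × Int)) (out : String) : Prop := out = solution_alt ps
instance (ps : List (Int × Int)) (out : String) : Decidable (Spec_solution ps out) := by unfold Spec_solution; infer_instance

-- ===== CLAIM (what is proved, stated in full; the proofs are below) =====
def Claim_equal_solution : Prop := ∀ (ps : List (Int × Int)), Dom_solution ps → Spec_solution ps (solution ps)


-- ===== LEMMAS AND PROOFS =====

-- helper names for the loop bodies of the two ports (definitionally equal to the lambdas above)
def pvStepA (st : PySem.Dict Int Int × PySem.Dict Int Int × PySem.Dict Int (List Int))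
    (ab : Int × Int) : PySem.Dict Int Int × PySem.Dict Int Int × PySem.Dict Int (List Int) :=
  let uc :=
    if st.2.2.getD (ab.2 - ab.1) [] ≠ [] then
      ((st.2.2.getD (ab.2 - ab.1) []).foldl (fun d p => d.modify p 0 (· + 1)) st.1, st.2.2)
    else pvPrimeFactorizationA (ab.2 - ab.1) st.1 st.2.2
  let dc :=
    if uc.2.getD ab.2 [] ≠ [] then
      ((uc.2.getD ab.2 []).foldl (fun d p => d.modify p 0 (· + 1)) st.2.1, uc.2)
    else pvPrimeFactorizationA ab.2 st.2.1 uc.2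
  (uc.1, dc.1, dc.2)

def pvCancelStep (ud : PySem.Dict Int Int × PySem.Dict Int Int) (p : Int) :
    PySem.Dict Int Int × PySem.Dict Int Int :=
  if ud.1.getD p 0 ≥ ud.2.getD p 0 then
    (ud.1.insert p (ud.1.getD p 0 - ud.2.getD p 0), ud.2.insert p 0)
  else
    (ud.1.insert p 0, ud.2.insert p (ud.2.getD p 0 - ud.1.getD p 0))

def pvAExpr (ps : List (Int × Int)) : String :=
  let st := ps.foldl pvStepA (PySem.Dict.empty, PySem.Dict.empty, PySem.Dict.empty)
  let ud := st.2.1.keys.foldl pvCancelStep (st.1, st.2.1)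
  let up := ud.1.keys.foldl
    (fun u p => (PySem.List.pyRange 0 (ud.1.getD p 0) 1).foldl
      (fun u _ => PySem.Int.mod (u * PySem.Int.mod p pvMOD) pvMOD) u) 1
  let down := ud.2.keys.foldl
    (fun u p => (PySem.List.pyRange 0 (ud.2.getD p 0) 1).foldl
      (fun u _ => PySem.Int.mod (u * PySem.Int.mod p pvMOD) pvMOD) u) 1
  PySem.Int.toStr up ++ " " ++ PySem.Int.toStr down

lemma solution_eq_AExpr (ps : List (Int × Int)) : solution ps = pvAExpr ps := rfl

-- a pure version of A's factorization loop (proof-side only; both ports are analysed through it)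
def pvFactLoop (fuel : Nat) (i n : Int) (fs : List Int) : Int × List Int :=
  match fuel with
  | 0 => (n, fs)
  | fuel + 1 =>
    if i * i ≤ n then
      if PySem.Int.mod n i ≠ 0 then
        pvFactLoop fuel (i + 1) n fs
      else
        pvFactLoop fuel i (PySem.Int.floordiv n i) (fs ++ [i])
    else (n, fs)

def pvFactors (n : Int) : List Int :=
  let r := pvFactLoop (n.toNat + 2) 2 n []
  if r.1 > 1 then r.2 ++ [r.1] else r.2

def pvCnt (d : PySem.Dict Int Int) (l : List Int) : PySem.Dict Int Int :=
  l.foldl (fun d p => d.modify p 0 (· + 1)) d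

lemma pvFactLoop_append (fuel : Nat) : ∀ (i n : Int) (fs : List Int),
    pvFactLoop fuel i n fs = ((pvFactLoop fuel i n []).1, fs ++ (pvFactLoop fuel i n []).2) := by
  induction fuel with
  | zero => intro i n fs; simp [pvFactLoop]
  | succ f ih =>
    intro i n fs
    simp only [pvFactLoop, List.nil_append]
    split
    · split
      · exact ih _ _ _
      · rw [ih i (PySem.Int.floordiv n i) (fs ++ [i]), ih i (PySem.Int.floordiv n i) [i]]
        simp
    · simp

lemma pvPfLoopA_eq (fuel : Nat) : ∀ (i n : Int) (primes : PySem.Dict Int Int) (fs : List Int),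
    pvPfLoopA fuel i n primes fs =
      ((pvFactLoop fuel i n fs).1, pvCnt primes (pvFactLoop fuel i n []).2,
        (pvFactLoop fuel i n fs).2) := by
  induction fuel with
  | zero => intro i n primes fs; simp [pvPfLoopA, pvFactLoop, pvCnt]
  | succ f ih =>
    intro i n primes fs
    simp only [pvPfLoopA, pvFactLoop, List.nil_append]
    split
    · split
      · exact ih _ _ _ _
      · rw [ih, pvFactLoop_append f i (PySem.Int.floordiv n i) [i]]
        simp [pvCnt]
    · simp [pvCnt]

lemma pvPrimeFactorizationA_eq (n : Int) (primes : PySem.Dict Int Int)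
    (cache : PySem.Dict Int (List Int)) :
    pvPrimeFactorizationA n primes cache =
      (pvCnt primes (pvFactors n), cache.insert n (pvFactors n)) := by
  simp only [pvPrimeFactorizationA, pvFactors, pvPfLoopA_eq]
  split
  · simp [pvCnt]
  · rfl

-- cache invariant: every stored factor list is the factorization of its key
def pvCInv (cache : PySem.Dict Int (List Int)) : Prop :=
  ∀ k v, cache.get? k = some v → v = pvFactors k

lemma pvCInv_empty : pvCInv PySem.Dict.empty := by
  intro k v h
  rw [PySem.Dict.get?_empty] at h
  cases h

lemma pvCInv_getD {cache : PySem.Dict Int (List Int)} (h : pvCInv cache) (k : Int)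
    (hne : cache.getD k [] ≠ []) : cache.getD k [] = pvFactors k := by
  rw [PySem.Dict.getD_eq_get?_getD] at hne ⊢
  cases hg : cache.get? k with
  | none => simp [hg] at hne
  | some v => simpa using h k v hg

lemma pvCInv_insert {cache : PySem.Dict Int (List Int)} (h : pvCInv cache) (n : Int) :
    pvCInv (cache.insert n (pvFactors n)) := by
  intro k v hk
  rw [PySem.Dict.get?_insert] at hk
  split at hk
  · next heq => subst heq; cases hk; rfl
  · exact h k v hk

lemma pvStepA_eq (ups downs : PySem.Dict Int Int) (cache : PySem.Dict Int (List Int))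
    (h : pvCInv cache) (ab : Int × Int) :
    ∃ cache₂, pvStepA (ups, downs, cache) ab =
      (pvCnt ups (pvFactors (ab.2 - ab.1)), pvCnt downs (pvFactors ab.2), cache₂)
      ∧ pvCInv cache₂ := by
  have step1 : ∃ c₁, (if cache.getD (ab.2 - ab.1) [] ≠ [] then
        ((cache.getD (ab.2 - ab.1) []).foldl (fun d p => d.modify p 0 (· + 1)) ups, cache)
      else pvPrimeFactorizationA (ab.2 - ab.1) ups cache)
      = (pvCnt ups (pvFactors (ab.2 - ab.1)), c₁) ∧ pvCInv c₁ := by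
    by_cases hc : cache.getD (ab.2 - ab.1) [] ≠ []
    · exact ⟨cache, by rw [if_pos hc, pvCInv_getD h _ hc]; rfl, h⟩
    · exact ⟨_, by rw [if_neg hc, pvPrimeFactorizationA_eq], pvCInv_insert h _⟩
  obtain ⟨c₁, h1, hi1⟩ := step1
  have step2 : ∃ c₂, (if c₁.getD ab.2 [] ≠ [] then
        ((c₁.getD ab.2 []).foldl (fun d p => d.modify p 0 (· + 1)) downs, c₁)
      else pvPrimeFactorizationA ab.2 downs c₁)
      = (pvCnt downs (pvFactors ab.2), c₂) ∧ pvCInv c₂ := by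
    by_cases hc : c₁.getD ab.2 [] ≠ []
    · exact ⟨c₁, by rw [if_pos hc, pvCInv_getD hi1 _ hc]; rfl, hi1⟩
    · exact ⟨_, by rw [if_neg hc, pvPrimeFactorizationA_eq], pvCInv_insert hi1 _⟩
  obtain ⟨c₂, h2, hi2⟩ := step2
  refine ⟨c₂, ?_, hi2⟩
  simp only [pvStepA, h1, h2]

lemma pvMainA_eq : ∀ (ps : List (Int × Int)) (ups downs : PySem.Dict Int Int)
    (cache : PySem.Dict Int (List Int)), pvCInv cache →
    ∃ cache', ps.foldl pvStepA (ups, downs, cache) =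
      (ps.foldl (fun d ab => pvCnt d (pvFactors (ab.2 - ab.1))) ups,
       ps.foldl (fun d ab => pvCnt d (pvFactors ab.2)) downs, cache') := by
  intro ps
  induction ps with
  | nil => exact fun ups downs cache _ => ⟨cache, rfl⟩
  | cons ab ps ih =>
    intro ups downs cache h
    obtain ⟨c₂, he, hi⟩ := pvStepA_eq ups downs cache h ab
    simp only [List.foldl_cons, he]
    exact ih _ _ _ hi

lemma getD_pvCnt (l : List Int) (d : PySem.Dict Int Int) (p : Int) :
    (pvCnt d l).getD p 0 = d.getD p 0 + (l.count p : Int) :=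
  PySem.Dict.getD_foldl_modify_add_one l d p

lemma getD_fold_cnt (f : Int × Int → List Int) :
    ∀ (ps : List (Int × Int)) (d : PySem.Dict Int Int) (p : Int),
    (ps.foldl (fun d ab => pvCnt d (f ab)) d).getD p 0
      = d.getD p 0 + ((ps.flatMap f).count p : Int) := by
  intro ps
  induction ps with
  | nil => intro d p; simp
  | cons ab ps ih =>
    intro d p
    simp only [List.foldl_cons, List.flatMap_cons]
    rw [ih, getD_pvCnt]
    push_cast [List.count_append]
    ring

lemma nodup_keys_pvCnt (l : List Int) (d : PySem.Dict Int Int) (h : d.keys.Nodup) :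
    (pvCnt d l).keys.Nodup :=
  PySem.Dict.nodup_keys_foldl_modify_key l (fun x => x) 0 (fun _ _ => (· + 1)) d h

lemma nodup_keys_fold_cnt (f : Int × Int → List Int) :
    ∀ (ps : List (Int × Int)) (d : PySem.Dict Int Int), d.keys.Nodup →
    (ps.foldl (fun d ab => pvCnt d (f ab)) d).keys.Nodup := by
  intro ps
  induction ps with
  | nil => exact fun d h => h
  | cons ab ps ih => exact fun d h => ih _ (nodup_keys_pvCnt _ _ h)

lemma mem_keys_of_getD_ne {d : PySem.Dict Int Int} {p : Int} (h : d.getD p 0 ≠ 0) :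
    p ∈ d.keys := by
  by_contra hm
  have hc : d.contains p = false := by
    cases hcv : d.contains p with
    | false => rfl
    | true => exact absurd ((PySem.Dict.contains_iff_mem_keys d p).mp hcv) hm
  exact h (PySem.Dict.getD_of_not_contains _ _ hc)

lemma mem_keys_pvCnt {l : List Int} {d : PySem.Dict Int Int} {p : Int}
    (h : p ∈ (pvCnt d l).keys) : p ∈ d.keys ∨ p ∈ l := by
  rw [pvCnt, PySem.Dict.keys_foldl_modify] at h
  exact (PySem.Set.mem_update _ _ _).mp h

lemma mem_keys_fold_cnt (f : Int × Int → List Int) :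
    ∀ (ps : List (Int × Int)) (d : PySem.Dict Int Int) (p : Int),
    p ∈ (ps.foldl (fun d ab => pvCnt d (f ab)) d).keys →
    p ∈ d.keys ∨ p ∈ ps.flatMap f := by
  intro ps
  induction ps with
  | nil => intro d p h; exact Or.inl h
  | cons ab ps ih =>
    intro d p h
    rcases ih _ _ (by simpa using h) with h' | h'
    · rcases mem_keys_pvCnt h' with h'' | h''
      · exact Or.inl h''
      · exact Or.inr (by
          simp only [List.flatMap_cons, List.mem_append]
          exact Or.inl h'')
    · exact Or.inr (by simp only [List.flatMap_cons, List.mem_append]; exact Or.inr h')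

lemma mem_keys_cancel : ∀ (ks : List Int) (ud : PySem.Dict Int Int × PySem.Dict Int Int)
    (p : Int),
    (p ∈ (ks.foldl pvCancelStep ud).1.keys → p ∈ ks ∨ p ∈ ud.1.keys) ∧
    (p ∈ (ks.foldl pvCancelStep ud).2.keys → p ∈ ks ∨ p ∈ ud.2.keys) := by
  intro ks
  induction ks with
  | nil => intro ud p; exact ⟨fun h => Or.inr h, fun h => Or.inr h⟩
  | cons q ks ih =>
    intro ud p
    simp only [List.foldl_cons]
    have hstep1 : (pvCancelStep ud q).1.keys = (ud.1.insert q ((ud.1.getD q 0 - ud.2.getD q 0))).keys ∨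
        (pvCancelStep ud q).1 = ud.1.insert q 0 := by
      unfold pvCancelStep; split
      · exact Or.inl rfl
      · exact Or.inr rfl
    constructor
    · intro h
      rcases (ih (pvCancelStep ud q) p).1 h with h' | h'
      · exact Or.inl (List.mem_cons_of_mem _ h')
      · have : p = q ∨ p ∈ ud.1.keys := by
          unfold pvCancelStep at h'
          split at h' <;> simpa [PySem.Dict.mem_keys_insert] using h'
        rcases this with h'' | h''
        · exact Or.inl (h'' ▸ List.mem_cons_self ..)
        · exact Or.inr h''
    · intro h
      rcases (ih (pvCancelStep ud q) p).2 h with h' | h'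
      · exact Or.inl (List.mem_cons_of_mem _ h')
      · have : p = q ∨ p ∈ ud.2.keys := by
          unfold pvCancelStep at h'
          split at h' <;> simpa [PySem.Dict.mem_keys_insert] using h'
        rcases this with h'' | h''
        · exact Or.inl (h'' ▸ List.mem_cons_self ..)
        · exact Or.inr h''

-- the cancellation pass ----------------------------------------------------------------------

lemma pvCancel_getD : ∀ (ks : List Int) (ups downs : PySem.Dict Int Int), ks.Nodup →
    (∀ p, (ks.foldl pvCancelStep (ups, downs)).1.getD p 0 =
       if p ∈ ks then (if ups.getD p 0 ≥ downs.getD p 0 then ups.getD p 0 - downs.getD p 0 else 0)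
       else ups.getD p 0) ∧
    (∀ p, (ks.foldl pvCancelStep (ups, downs)).2.getD p 0 =
       if p ∈ ks then (if ups.getD p 0 ≥ downs.getD p 0 then 0 else downs.getD p 0 - ups.getD p 0)
       else downs.getD p 0) ∧
    (ups.keys.Nodup → (ks.foldl pvCancelStep (ups, downs)).1.keys.Nodup) ∧
    (downs.keys.Nodup → (ks.foldl pvCancelStep (ups, downs)).2.keys.Nodup) := by
  intro ks
  induction ks with
  | nil =>
    intro ups downs _
    exact ⟨fun p => by simp, fun p => by simp, id, id⟩
  | cons q ks ih =>
    intro ups downs hnd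
    obtain ⟨hq, hks⟩ := List.nodup_cons.mp hnd
    simp only [List.foldl_cons]
    by_cases hge : ups.getD q 0 ≥ downs.getD q 0
    · rw [show pvCancelStep (ups, downs) q
          = (ups.insert q (ups.getD q 0 - downs.getD q 0), downs.insert q 0) from by
        simp [pvCancelStep, hge]]
      obtain ⟨ihu, ihd, ihnu, ihnd⟩ :=
        ih (ups.insert q (ups.getD q 0 - downs.getD q 0)) (downs.insert q 0) hks
      refine ⟨fun p => ?_, fun p => ?_,
        fun hu => ihnu (PySem.Dict.nodup_keys_insert _ _ _ hu),
        fun hd => ihnd (PySem.Dict.nodup_keys_insert _ _ _ hd)⟩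
      · rw [ihu p]
        by_cases hpq : p = q
        · subst hpq
          simp [hq, hge]
        · by_cases hpm : p ∈ ks <;>
            simp [hpq, hpm, PySem.Dict.getD_insert, List.mem_cons]
      · rw [ihd p]
        by_cases hpq : p = q
        · subst hpq
          simp [hq, hge]
        · by_cases hpm : p ∈ ks <;>
            simp [hpq, hpm, PySem.Dict.getD_insert, List.mem_cons]
    · rw [show pvCancelStep (ups, downs) q
          = (ups.insert q 0, downs.insert q (downs.getD q 0 - ups.getD q 0)) from by
        simp [pvCancelStep, hge]]
      obtain ⟨ihu, ihd, ihnu, ihnd⟩ :=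
        ih (ups.insert q 0) (downs.insert q (downs.getD q 0 - ups.getD q 0)) hks
      refine ⟨fun p => ?_, fun p => ?_,
        fun hu => ihnu (PySem.Dict.nodup_keys_insert _ _ _ hu),
        fun hd => ihnd (PySem.Dict.nodup_keys_insert _ _ _ hd)⟩
      · rw [ihu p]
        by_cases hpq : p = q
        · subst hpq
          simp [hq, hge]
        · by_cases hpm : p ∈ ks <;>
            simp [hpq, hpm, PySem.Dict.getD_insert, List.mem_cons]
      · rw [ihd p]
        by_cases hpq : p = q
        · subst hpq
          simp [hq, hge]
        · by_cases hpm : p ∈ ks <;>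
            simp [hpq, hpm, PySem.Dict.getD_insert, List.mem_cons]

-- correctness of the trial-division loop: factors are prime and multiply back to n ------------

lemma pvFactLoop_stop (fuel : Nat) (i n : Int) (fs : List Int) (h : ¬ i * i ≤ n) :
    pvFactLoop (fuel + 1) i n fs = (n, fs) := by
  simp [pvFactLoop, h]

lemma pvFactLoop_inv : ∀ (fuel : Nat) (i n : Int), 2 ≤ i → 1 ≤ n →
    (∀ j : Int, 2 ≤ j → j < i → ¬ j ∣ n) → n.toNat + 1 < fuel + i.toNat →
    (∀ p ∈ (pvFactLoop fuel i n []).2, 2 ≤ p ∧ p.toNat.Prime) ∧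
    (pvFactLoop fuel i n []).1 * ((pvFactLoop fuel i n []).2).prod = n ∧
    1 ≤ (pvFactLoop fuel i n []).1 ∧
    ((pvFactLoop fuel i n []).1 = 1 ∨ ((pvFactLoop fuel i n []).1).toNat.Prime) := by
  intro fuel
  induction fuel with
  | zero =>
    intro i n hi hn hdvd hfuel
    have hni : n < i := by omega
    have hn1 : n = 1 := by
      by_contra h1
      exact hdvd n (by omega) hni dvd_rfl
    simp [pvFactLoop, hn1]
  | succ fuel ih =>
    intro i n hi hn hdvd hfuel
    by_cases hcond : i * i ≤ n
    · by_cases hmod : PySem.Int.mod n i ≠ 0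
      · -- i does not divide n: i += 1
        have hrec : pvFactLoop (fuel + 1) i n [] = pvFactLoop fuel (i + 1) n [] := by
          simp [pvFactLoop, hcond, hmod]
        rw [hrec]
        refine ih (i + 1) n (by omega) hn (fun j hj hj' hdj => ?_) (by omega)
        rcases lt_or_eq_of_le (show j ≤ i by omega) with h' | h'
        · exact hdvd j hj h' hdj
        · subst h'
          exact hmod ((PySem.Int.mod_eq_zero_iff_dvd n j).mpr hdj)
      · -- i divides n: n //= i, factors.append(i)
        have hdvdi : i ∣ n := (PySem.Int.mod_eq_zero_iff_dvd n i).mp (not_not.mp hmod)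
        have hipos : (0 : Int) < i := by omega
        have hfd : PySem.Int.floordiv n i = n / i := PySem.Int.floordiv_eq_ediv_of_pos hipos
        have hmul : n / i * i = n := Int.ediv_mul_cancel hdvdi
        have hn'1 : 1 ≤ n / i := (Int.le_ediv_iff_mul_le hipos).mpr (by nlinarith)
        have hn'lt : n / i < n := by nlinarith
        have hrec : pvFactLoop (fuel + 1) i n [] = pvFactLoop fuel i (n / i) ([] ++ [i]) := by
          rw [show pvFactLoop (fuel + 1) i n [] =
            (if i * i ≤ n then
              (if PySem.Int.mod n i ≠ 0 then pvFactLoop fuel (i + 1) n []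
               else pvFactLoop fuel i (PySem.Int.floordiv n i) ([] ++ [i]))
             else (n, [])) from rfl]
          rw [if_pos hcond, if_neg hmod, hfd]
        have happ := pvFactLoop_append fuel i (n / i) [i]
        have hiprime : i.toNat.Prime := by
          by_contra hnp
          have hit2 : 2 ≤ i.toNat := by omega
          have hlt : i.toNat.minFac < i.toNat := (Nat.not_prime_iff_minFac_lt hit2).mp hnp
          have h2le : 2 ≤ i.toNat.minFac := (Nat.minFac_prime (by omega)).two_le
          have hdd : (i.toNat.minFac : Int) ∣ n := by
            refine dvd_trans ?_ hdvdi
            have : (i.toNat.minFac : Int) ∣ (i.toNat : Int) :=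
              Int.natCast_dvd_natCast.mpr (Nat.minFac_dvd _)
            simpa [Int.toNat_of_nonneg (by omega : (0:Int) ≤ i)] using this
          exact hdvd _ (by exact_mod_cast h2le) (by omega) hdd
        have hdvd' : ∀ j : Int, 2 ≤ j → j < i → ¬ j ∣ n / i := by
          intro j hj hj' hdj
          exact hdvd j hj hj' (hdj.trans ⟨i, by omega⟩)
        obtain ⟨ihp, ihm, ihpos, ihtail⟩ := ih i (n / i) hi hn'1 hdvd' (by omega)
        rw [hrec, show ([] : List Int) ++ [i] = [i] from rfl, happ]
        refine ⟨?_, ?_, ihpos, ihtail⟩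
        · intro p hp
          rcases List.mem_append.mp hp with hp' | hp'
          · rw [List.mem_singleton] at hp'
            exact hp' ▸ ⟨hi, hiprime⟩
          · exact ihp p hp'
        · simp only [List.prod_append, List.prod_cons, List.prod_nil]
          calc (pvFactLoop fuel i (n / i) []).1 * (i * 1 * (pvFactLoop fuel i (n / i) []).2.prod)
              = ((pvFactLoop fuel i (n / i) []).1 * (pvFactLoop fuel i (n / i) []).2.prod) * i := by
                ring
            _ = (n / i) * i := by rw [ihm]
            _ = n := hmul
    · -- loop exit: n is 1 or prime
      rw [pvFactLoop_stop fuel i n [] hcond]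
      refine ⟨by simp, by simp, hn, ?_⟩
      by_cases hn2 : n = 1
      · exact Or.inl hn2
      · right
        have hn2' : 2 ≤ n := by omega
        by_contra hnp
        have hpos : 0 < n.toNat := by omega
        have h1 : n.toNat ≠ 1 := by omega
        have hmf2 : 2 ≤ n.toNat.minFac := (Nat.minFac_prime h1).two_le
        have hdd : (n.toNat.minFac : Int) ∣ n := by
          have : (n.toNat.minFac : Int) ∣ (n.toNat : Int) :=
            Int.natCast_dvd_natCast.mpr (Nat.minFac_dvd _)
          simpa [Int.toNat_of_nonneg (by omega : (0:Int) ≤ n)] using this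
        have hsq : n.toNat.minFac ^ 2 ≤ n.toNat := Nat.minFac_sq_le_self hpos hnp
        have hlt : (n.toNat.minFac : Int) < i := by
          by_contra hge
          rw [not_lt] at hge
          have : i * i ≤ (n.toNat.minFac : Int) * n.toNat.minFac :=
            mul_le_mul hge hge (by omega) (by omega)
          have h2 : ((n.toNat.minFac ^ 2 : Nat) : Int) ≤ n := by
            exact_mod_cast le_trans (Int.ofNat_le.mpr hsq) (by omega)
          push_cast [pow_two] at h2
          omega
        exact hdvd _ (by exact_mod_cast hmf2) hlt hdd

lemma pvFactors_facts (n : Int) :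
    (∀ p ∈ pvFactors n, 2 ≤ p ∧ p.toNat.Prime) ∧ (pvFactors n).prod = if n > 1 then n else 1 := by
  by_cases h1 : 1 < n
  · obtain ⟨hp, hm, hpos, htail⟩ :=
      pvFactLoop_inv (n.toNat + 2) 2 n (le_refl 2) (by omega)
        (fun j hj hj' _ => absurd (lt_of_lt_of_le hj' hj) (lt_irrefl j)) (by omega)
    unfold pvFactors
    by_cases hr : (pvFactLoop (n.toNat + 2) 2 n []).1 > 1
    · rw [if_pos hr, if_pos h1]
      refine ⟨?_, ?_⟩
      · intro p hpmem
        rcases List.mem_append.mp hpmem with h' | h'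
        · exact hp p h'
        · rw [List.mem_singleton] at h'
          subst h'
          refine ⟨by omega, ?_⟩
          rcases htail with h'' | h''
          · omega
          · exact h''
      · rw [List.prod_append, List.prod_singleton, mul_comm]
        exact hm
    · rw [if_neg hr, if_pos h1]
      have : (pvFactLoop (n.toNat + 2) 2 n []).1 = 1 := by omega
      exact ⟨hp, by rw [this, one_mul] at hm; exact hm⟩
  · -- n ≤ 1: the loop never runs (4 ≤ n is false) and the tail test fails
    have hstop : pvFactLoop (n.toNat + 2) 2 n [] = (n, []) := by
      rw [show n.toNat + 2 = (n.toNat + 1) + 1 from rfl]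
      exact pvFactLoop_stop _ 2 n [] (by omega)
    unfold pvFactors
    rw [hstop]
    simp only [if_neg (by omega : ¬ (n > 1))]
    exact ⟨by simp, by simp⟩

lemma pvFactors_prime (n : Int) : ∀ p ∈ pvFactors n, 2 ≤ p ∧ p.toNat.Prime :=
  (pvFactors_facts n).1

lemma pvFactors_prod (n : Int) : (pvFactors n).prod = if n > 1 then n else 1 :=
  (pvFactors_facts n).2

-- the two factor multisets -------------------------------------------------------------------

def pvUL (ps : List (Int × Int)) : List Int := ps.flatMap (fun ab => pvFactors (ab.2 - ab.1))
def pvDL (ps : List (Int × Int)) : List Int := ps.flatMap (fun ab => pvFactors ab.2)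

lemma pvUL_mem (ps : List (Int × Int)) : ∀ p ∈ pvUL ps, 2 ≤ p ∧ p.toNat.Prime := by
  intro p hp
  obtain ⟨ab, _, hmem⟩ := List.mem_flatMap.mp hp
  exact pvFactors_prime _ p hmem

lemma pvDL_mem (ps : List (Int × Int)) : ∀ p ∈ pvDL ps, 2 ≤ p ∧ p.toNat.Prime := by
  intro p hp
  obtain ⟨ab, _, hmem⟩ := List.mem_flatMap.mp hp
  exact pvFactors_prime _ p hmem

-- Int↔Nat bookkeeping for lists of factors
lemma count_map_toNat : ∀ (l : List Int), (∀ p ∈ l, 2 ≤ p) → ∀ (q : ℕ), 2 ≤ q →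
    (l.map Int.toNat).count q = l.count (q : Int) := by
  intro l
  induction l with
  | nil => intro _ q _; simp
  | cons a l ih =>
    intro h q hq
    have ha : 2 ≤ a := h a (List.mem_cons_self ..)
    have ih' := ih (fun p hp => h p (List.mem_cons_of_mem _ hp)) q hq
    simp only [List.map_cons, List.count_cons, ih']
    congr 1
    have : (a.toNat = q) ↔ (a = (q : Int)) := by omega
    by_cases hcase : a = (q : Int)
    · simp [hcase]
    · simp [hcase, this.not.mpr hcase]

lemma prod_map_toNat : ∀ (l : List Int), (∀ p ∈ l, 2 ≤ p) →
    ((l.map Int.toNat).prod : Int) = l.prod := by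
  intro l
  induction l with
  | nil => intro _; simp
  | cons a l ih =>
    intro h
    have ha : 2 ≤ a := h a (List.mem_cons_self ..)
    simp only [List.map_cons, List.prod_cons, Nat.cast_mul]
    rw [ih (fun p hp => h p (List.mem_cons_of_mem _ hp))]
    congr 1
    omega

-- the key-indexed power product of a dict equals the product of the corresponding multiset
lemma pvKey_prod : ∀ (l : List Int), l.Nodup → (∀ p ∈ l, 2 ≤ p) →
    ∀ (m : Multiset ℕ) (e : Int → Int),
    (∀ p ∈ l, (e p).toNat = m.count p.toNat) → (∀ q ∈ m, (q : Int) ∈ l) →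
    (l.map (fun p => p ^ (e p).toNat)).prod = (m.prod : Int) := by
  intro l
  induction l with
  | nil =>
    intro _ _ m e _ hsupp
    have : m = 0 := Multiset.eq_zero_of_forall_notMem (fun q hq => by simpa using hsupp q hq)
    simp [this]
  | cons p l ih =>
    intro hnd h2 m e hcnt hsupp
    obtain ⟨hpl, hlnd⟩ := List.nodup_cons.mp hnd
    have hp2 : 2 ≤ p := h2 p (List.mem_cons_self ..)
    set q0 : ℕ := p.toNat with hq0
    have hdec : m.filter (q0 = ·) + m.filter (fun a => ¬ q0 = a) = m :=
      Multiset.filter_add_not _ m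
    have hrepl : m.filter (q0 = ·) = Multiset.replicate (m.count q0) q0 := Multiset.filter_eq m q0
    set rest : Multiset ℕ := m.filter (fun a => ¬ q0 = a) with hrest
    have hcnt_rest : ∀ p' ∈ l, (e p').toNat = rest.count p'.toNat := by
      intro p' hp'
      have hne : ¬ q0 = p'.toNat := by
        intro hEq
        have hp'2 : 2 ≤ p' := h2 p' (List.mem_cons_of_mem _ hp')
        have : p = p' := by omega
        exact hpl (this ▸ hp')
      rw [hrest, Multiset.count_filter, if_pos hne]
      exact hcnt p' (List.mem_cons_of_mem _ hp')
    have hsupp_rest : ∀ q ∈ rest, (q : Int) ∈ l := by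
      intro q hq
      rw [hrest, Multiset.mem_filter] at hq
      obtain ⟨hqm, hqne⟩ := hq
      rcases List.mem_cons.mp (hsupp q hqm) with h' | h'
      · exfalso; exact hqne (by omega)
      · exact h'
    have hih := ih hlnd (fun p' hp' => h2 p' (List.mem_cons_of_mem _ hp')) rest e
      hcnt_rest hsupp_rest
    have hprod : m.prod = q0 ^ m.count q0 * rest.prod := by
      conv_lhs => rw [← hdec]
      rw [Multiset.prod_add, hrepl, Multiset.prod_replicate]
    simp only [List.map_cons, List.prod_cons, hih, hprod]
    push_cast
    rw [hcnt p (List.mem_cons_self ..)]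
    congr 2
    omega

-- gcd of products of prime multisets --------------------------------------------------------

lemma coprime_of_disjoint_primes : ∀ (s : Multiset ℕ), (∀ p ∈ s, p.Prime) →
    ∀ (t : Multiset ℕ), (∀ q ∈ t, q.Prime) → (∀ x, x ∈ s → x ∉ t) →
    Nat.Coprime s.prod t.prod := by
  intro s
  refine Multiset.induction_on s ?_ ?_
  · intro _ t _ _
    simp [Nat.Coprime]
  · intro a s ih hs t ht hdisj
    rw [Multiset.prod_cons]
    refine Nat.Coprime.mul_left ?_
      (ih (fun p hp => hs p (Multiset.mem_cons_of_mem hp)) t ht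
        (fun x hx => hdisj x (Multiset.mem_cons_of_mem hx)))
    have ha : a.Prime := hs a (Multiset.mem_cons_self a s)
    rw [Nat.Prime.coprime_iff_not_dvd ha]
    intro hdvd
    obtain ⟨q, hqt, haq⟩ := ha.prime.exists_mem_multiset_dvd hdvd
    have : a = q := ((Nat.prime_dvd_prime_iff_eq ha (ht q hqt)).mp haq)
    exact hdisj a (Multiset.mem_cons_self a s) (this ▸ hqt)

lemma gcd_prime_products (s t : Multiset ℕ) (hs : ∀ p ∈ s, p.Prime)
    (ht : ∀ q ∈ t, q.Prime) : Nat.gcd s.prod t.prod = (s ∩ t).prod := by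
  have hsplit_s : s.prod = (s - t).prod * (s ∩ t).prod := by
    conv_lhs => rw [← Multiset.sub_add_inter s t]
    rw [Multiset.prod_add]
  have hsplit_t : t.prod = (t - s).prod * (s ∩ t).prod := by
    conv_lhs => rw [← Multiset.sub_add_inter t s]
    rw [Multiset.prod_add, Multiset.inter_comm]
  rw [hsplit_s, hsplit_t, Nat.gcd_mul_right]
  have hcop : Nat.Coprime (s - t).prod (t - s).prod := by
    refine coprime_of_disjoint_primes (s - t)
      (fun p hp => hs p (by
        have := Multiset.count_pos.mpr hp
        rw [Multiset.count_sub] at this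
        exact Multiset.count_pos.mp (by omega)))
      (t - s)
      (fun q hq => ht q (by
        have := Multiset.count_pos.mpr hq
        rw [Multiset.count_sub] at this
        exact Multiset.count_pos.mp (by omega)))
      ?_
    intro x hx1 hx2
    have h1 := Multiset.count_pos.mpr hx1
    have h2 := Multiset.count_pos.mpr hx2
    rw [Multiset.count_sub] at h1 h2
    omega
  rw [hcop, one_mul]

lemma inter_prod_pos (s t : Multiset ℕ) (hs : ∀ p ∈ s, p.Prime) :
    0 < (s ∩ t).prod :=
  Multiset.prod_pos (fun a ha => (hs a (Multiset.mem_inter.mp ha).1).pos)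

lemma sub_prod_div (s t : Multiset ℕ) (hpos : 0 < (s ∩ t).prod) :
    s.prod / (s ∩ t).prod = (s - t).prod := by
  have h2 : s.prod = (s - t).prod * (s ∩ t).prod := by
    conv_lhs => rw [← Multiset.sub_add_inter s t]
    rw [Multiset.prod_add]
  rw [h2]
  exact Nat.mul_div_cancel _ hpos

-- the Euclidean loop of B computes gcd ------------------------------------------------------

lemma pvGcdLoop_eq : ∀ (fuel : Nat) (g r : Int), 0 ≤ g → 0 ≤ r → r.toNat < fuel →
    pvGcdLoop fuel g r = (Nat.gcd g.toNat r.toNat : Int) := by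
  intro fuel
  induction fuel with
  | zero => intro g r _ _ h; omega
  | succ fuel ih =>
    intro g r hg hr hfuel
    by_cases hrz : r = 0
    · subst hrz
      simp only [pvGcdLoop, ne_eq, not_true_eq_false, if_false, Int.toNat_zero,
        Nat.gcd_zero_right]
      omega
    · have hrpos : 0 < r := by omega
      have hmod : PySem.Int.mod g r = g % r := PySem.Int.mod_eq_emod_of_pos hrpos
      have hnn : 0 ≤ g % r := Int.emod_nonneg g (by omega)
      have hlt : g % r < r := Int.emod_lt_of_pos g hrpos
      have hrec : pvGcdLoop (fuel + 1) g r = pvGcdLoop fuel r (g % r) := by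
        simp [pvGcdLoop, hrz, hmod]
      rw [hrec, ih r (g % r) (by omega) hnn (by omega)]
      have hcast : (g % r).toNat = g.toNat % r.toNat := by
        have h1 : ((g.toNat : Int)) % ((r.toNat : Int)) = ((g.toNat % r.toNat : Nat) : Int) :=
          (Int.natCast_emod _ _).symm
        have hgg : ((g.toNat : Int)) = g := by omega
        have hrr : ((r.toNat : Int)) = r := by omega
        rw [hgg, hrr] at h1
        omega
      rw [hcast, Nat.gcd_comm g.toNat r.toNat, Nat.gcd_rec r.toNat g.toNat, Nat.gcd_comm]

-- B's accumulation loop is the product of the two factor lists ------------------------------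

lemma pvBfold : ∀ (ps : List (Int × Int)) (x y : Int),
    ps.foldl (fun (nd : Int × Int) ab =>
        let d := ab.2 - ab.1
        (if d > 1 then nd.1 * d else nd.1, if ab.2 > 1 then nd.2 * ab.2 else nd.2)) (x, y)
      = (x * (pvUL ps).prod, y * (pvDL ps).prod) := by
  intro ps
  induction ps with
  | nil => intro x y; simp [pvUL, pvDL]
  | cons ab ps ih =>
    intro x y
    simp only [List.foldl_cons]
    rw [ih]
    simp only [pvUL, pvDL, List.flatMap_cons, List.prod_append]
    have h1 : (if ab.2 - ab.1 > 1 then x * (ab.2 - ab.1) else x)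
        = x * (pvFactors (ab.2 - ab.1)).prod := by
      rw [pvFactors_prod]
      split <;> simp
    have h2 : (if ab.2 > 1 then y * ab.2 else y) = y * (pvFactors ab.2).prod := by
      rw [pvFactors_prod]
      split <;> simp
    rw [h1, h2, Prod.mk.injEq]
    constructor <;> ring

-- modular products --------------------------------------------------------------------------

def pvProd (l : List Int) (f : Int → Int) : Int :=
  (l.map (fun p => PySem.Int.mod p pvMOD ^ (f p).toNat)).prod

lemma pvM_pos : (0 : Int) < pvMOD := by norm_num [pvMOD]

lemma pvmod_emod (a : Int) : PySem.Int.mod a pvMOD = a % pvMOD :=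
  PySem.Int.mod_eq_emod_of_pos pvM_pos

lemma pvmod_fuse (a b : Int) : (a % pvMOD * b) % pvMOD = (a * b) % pvMOD := by
  calc (a % pvMOD * b) % pvMOD
      = (a % pvMOD % pvMOD * (b % pvMOD)) % pvMOD := by rw [Int.mul_emod]
    _ = (a % pvMOD * (b % pvMOD)) % pvMOD := by rw [Int.emod_emod_of_dvd _ dvd_rfl]
    _ = (a * b) % pvMOD := by rw [← Int.mul_emod]

lemma pvLen_pyRange (e : Int) : (PySem.List.pyRange 0 e 1).length = e.toNat := by
  simp [PySem.List.pyRange]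
  omega

lemma innerA_fold : ∀ (l : List Int) (u x : Int), 0 ≤ u → u < pvMOD →
    l.foldl (fun u _ => PySem.Int.mod (u * x) pvMOD) u
      = PySem.Int.mod (u * x ^ l.length) pvMOD := by
  intro l
  induction l with
  | nil =>
    intro u x h0 h1
    simp [pvmod_emod, Int.emod_eq_of_lt h0 h1]
  | cons a l ih =>
    intro u x h0 h1
    simp only [List.foldl_cons]
    rw [ih _ _ (by rw [pvmod_emod]; exact Int.emod_nonneg _ pvM_pos.ne')
        (by rw [pvmod_emod]; exact Int.emod_lt_of_pos _ pvM_pos)]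
    simp only [pvmod_emod, List.length_cons]
    rw [pvmod_fuse, pow_succ]
    congr 1
    ring

lemma outerA_fold (g : Int → Int) : ∀ (l : List Int) (u : Int), 0 ≤ u → u < pvMOD →
    l.foldl (fun u p => (PySem.List.pyRange 0 (g p) 1).foldl
        (fun u _ => PySem.Int.mod (u * PySem.Int.mod p pvMOD) pvMOD) u) u
      = PySem.Int.mod (u * pvProd l g) pvMOD := by
  intro l
  induction l with
  | nil =>
    intro u h0 h1
    simp [pvProd, pvmod_emod, Int.emod_eq_of_lt h0 h1]
  | cons p l ih =>
    intro u h0 h1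
    simp only [List.foldl_cons]
    rw [innerA_fold _ _ _ h0 h1, pvLen_pyRange]
    rw [ih _ (by rw [pvmod_emod]; exact Int.emod_nonneg _ pvM_pos.ne')
        (by rw [pvmod_emod]; exact Int.emod_lt_of_pos _ pvM_pos)]
    simp only [pvProd, List.map_cons, List.prod_cons, pvmod_emod]
    rw [pvmod_fuse]
    congr 1
    ring

lemma pvpow_emod (a : Int) (k : ℕ) : (a % pvMOD) ^ k % pvMOD = a ^ k % pvMOD := by
  induction k with
  | zero => simp
  | succ k ih =>
    rw [pow_succ, pow_succ, Int.mul_emod, ih, Int.emod_emod_of_dvd _ dvd_rfl, ← Int.mul_emod]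

-- dropping the (p % MOD) in the bases does not change the product mod MOD
lemma pvProd_emod (l : List Int) (f : Int → Int) :
    pvProd l f % pvMOD = (l.map (fun p => p ^ (f p).toNat)).prod % pvMOD := by
  induction l with
  | nil => simp [pvProd]
  | cons p l ih =>
    simp only [pvProd, List.map_cons, List.prod_cons] at *
    rw [Int.mul_emod, ih, pvmod_emod, pvpow_emod, ← Int.mul_emod]

-- assembly ----------------------------------------------------------------------------------

lemma solution_eq (ps : List (Int × Int)) : solution ps = solution_alt ps := by
  rw [solution_eq_AExpr]
  -- the factor lists and their Nat images
  set U : List Int := pvUL ps with hU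
  set D : List Int := pvDL ps with hD
  set UN : List ℕ := U.map Int.toNat with hUN
  set DN : List ℕ := D.map Int.toNat with hDN
  have hU2 : ∀ p ∈ U, 2 ≤ p := fun p hp => (pvUL_mem ps p hp).1
  have hD2 : ∀ p ∈ D, 2 ≤ p := fun p hp => (pvDL_mem ps p hp).1
  have hUNprime : ∀ q ∈ (↑UN : Multiset ℕ), q.Prime := by
    intro q hq
    rw [Multiset.mem_coe, hUN, List.mem_map] at hq
    obtain ⟨p, hp, rfl⟩ := hq
    exact (pvUL_mem ps p hp).2
  have hDNprime : ∀ q ∈ (↑DN : Multiset ℕ), q.Prime := by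
    intro q hq
    rw [Multiset.mem_coe, hDN, List.mem_map] at hq
    obtain ⟨p, hp, rfl⟩ := hq
    exact (pvDL_mem ps p hp).2
  -- A side: the two counters after the main loop
  obtain ⟨cache', hfold⟩ := pvMainA_eq ps PySem.Dict.empty PySem.Dict.empty PySem.Dict.empty
    pvCInv_empty
  set UPS := ps.foldl (fun d ab => pvCnt d (pvFactors (ab.2 - ab.1))) PySem.Dict.empty with hUPS
  set DWN := ps.foldl (fun d ab => pvCnt d (pvFactors ab.2)) PySem.Dict.empty with hDWN
  have hUval : ∀ p, UPS.getD p 0 = (U.count p : Int) := by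
    intro p; rw [hUPS, getD_fold_cnt]; simp [hU, pvUL]
  have hDval : ∀ p, DWN.getD p 0 = (D.count p : Int) := by
    intro p; rw [hDWN, getD_fold_cnt]; simp [hD, pvDL]
  have hUnd : UPS.keys.Nodup := nodup_keys_fold_cnt _ ps _ (by simp)
  have hDnd : DWN.keys.Nodup := nodup_keys_fold_cnt _ ps _ (by simp)
  obtain ⟨hcu, hcd, hcnu, hcnd⟩ := pvCancel_getD DWN.keys UPS DWN hDnd
  have hDsupp : ∀ p, p ∉ DWN.keys → (D.count p : Int) = 0 := by
    intro p hp
    by_contra hne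
    exact hp (mem_keys_of_getD_ne (by rw [hDval]; exact hne))
  -- the final exponent functions of the A side
  have hAup : ∀ p, (DWN.keys.foldl pvCancelStep (UPS, DWN)).1.getD p 0
      = if (U.count p : Int) ≥ (D.count p : Int) then (U.count p : Int) - (D.count p : Int)
        else 0 := by
    intro p
    rw [hcu p]
    by_cases hp : p ∈ DWN.keys
    · simp [hp, hUval, hDval]
    · have h0 := hDsupp p hp
      rw [if_neg hp, hUval p]
      rw [show ((D.count p : Int)) = 0 from h0]
      simp
  have hAdown : ∀ p, (DWN.keys.foldl pvCancelStep (UPS, DWN)).2.getD p 0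
      = if (U.count p : Int) ≥ (D.count p : Int) then 0
        else (D.count p : Int) - (U.count p : Int) := by
    intro p
    rw [hcd p]
    by_cases hp : p ∈ DWN.keys
    · simp [hp, hUval, hDval]
    · have h0 := hDsupp p hp
      rw [if_neg hp]
      rw [show ((DWN.getD p 0)) = 0 from by rw [hDval]; exact h0]
      rw [if_pos (by rw [h0]; exact Int.natCast_nonneg _)]
  -- every key of the final dicts is an element of U or D, hence ≥ 2
  have hkey2 : ∀ p, (p ∈ (DWN.keys.foldl pvCancelStep (UPS, DWN)).1.keys ∨
      p ∈ (DWN.keys.foldl pvCancelStep (UPS, DWN)).2.keys) → 2 ≤ p := by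
    intro p hp
    have hUPSk : p ∈ UPS.keys → 2 ≤ p := by
      intro h
      rcases mem_keys_fold_cnt _ ps _ p (hUPS ▸ h) with h' | h'
      · simp at h'
      · exact hU2 p (hU ▸ h')
    have hDWNk : p ∈ DWN.keys → 2 ≤ p := by
      intro h
      rcases mem_keys_fold_cnt _ ps _ p (hDWN ▸ h) with h' | h'
      · simp at h'
      · exact hD2 p (hD ▸ h')
    rcases hp with h | h
    · rcases (mem_keys_cancel DWN.keys (UPS, DWN) p).1 h with h' | h'
      · exact hDWNk h'
      · exact hUPSk h'
    · rcases (mem_keys_cancel DWN.keys (UPS, DWN) p).2 h with h' | h'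
      · exact hDWNk h'
      · exact hDWNk h'
  -- count translations
  have hcountU : ∀ (q : ℕ), 2 ≤ q → UN.count q = U.count (q : Int) := by
    intro q hq; exact count_map_toNat U hU2 q hq
  have hcountD : ∀ (q : ℕ), 2 ≤ q → DN.count q = D.count (q : Int) := by
    intro q hq; exact count_map_toNat D hD2 q hq
  -- the reduced multisets
  set mU : Multiset ℕ := (↑UN : Multiset ℕ) - ↑DN with hmU
  set mD : Multiset ℕ := (↑DN : Multiset ℕ) - ↑UN with hmD
  have hmem_ge2 : ∀ q : ℕ, q ∈ (↑UN : Multiset ℕ) ∨ q ∈ (↑DN : Multiset ℕ) → 2 ≤ q := by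
    intro q hq
    rcases hq with h | h
    · exact (hUNprime q h).two_le
    · exact (hDNprime q h).two_le
  -- up side: the power product over A's keys is mU.prod
  have hupKey : ((DWN.keys.foldl pvCancelStep (UPS, DWN)).1.keys.map
      (fun p => p ^ ((DWN.keys.foldl pvCancelStep (UPS, DWN)).1.getD p 0).toNat)).prod
      = (mU.prod : Int) := by
    refine pvKey_prod _ (hcnu hUnd) (fun p hp => hkey2 p (Or.inl hp)) mU _ ?_ ?_
    · intro p hp
      have hp2 : 2 ≤ p := hkey2 p (Or.inl hp)
      rw [hAup p, hmU]
      rw [Multiset.count_sub, Multiset.coe_count, Multiset.coe_count]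
      rw [hcountU p.toNat (by omega), hcountD p.toNat (by omega)]
      rw [show ((p.toNat : Int)) = p from by omega]
      split <;> omega
    · intro q hq
      have hqm : 0 < Multiset.count q mU := Multiset.count_pos.mpr hq
      rw [hmU, Multiset.count_sub, Multiset.coe_count, Multiset.coe_count] at hqm
      have hq2 : 2 ≤ q := hmem_ge2 q (Or.inl (by
        rw [Multiset.mem_coe, ← List.count_pos_iff]
        omega))
      refine mem_keys_of_getD_ne ?_
      rw [hAup ((q : Int))]
      rw [← hcountU q hq2, ← hcountD q hq2]
      split <;> omega
  -- down side
  have hdownKey : ((DWN.keys.foldl pvCancelStep (UPS, DWN)).2.keys.map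
      (fun p => p ^ ((DWN.keys.foldl pvCancelStep (UPS, DWN)).2.getD p 0).toNat)).prod
      = (mD.prod : Int) := by
    refine pvKey_prod _ (hcnd hDnd) (fun p hp => hkey2 p (Or.inr hp)) mD _ ?_ ?_
    · intro p hp
      have hp2 : 2 ≤ p := hkey2 p (Or.inr hp)
      rw [hAdown p, hmD]
      rw [Multiset.count_sub, Multiset.coe_count, Multiset.coe_count]
      rw [hcountU p.toNat (by omega), hcountD p.toNat (by omega)]
      rw [show ((p.toNat : Int)) = p from by omega]
      split <;> omega
    · intro q hq
      have hqm : 0 < Multiset.count q mD := Multiset.count_pos.mpr hq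
      rw [hmD, Multiset.count_sub, Multiset.coe_count, Multiset.coe_count] at hqm
      have hq2 : 2 ≤ q := hmem_ge2 q (Or.inr (by
        rw [Multiset.mem_coe, ← List.count_pos_iff]
        omega))
      refine mem_keys_of_getD_ne ?_
      rw [hAdown ((q : Int))]
      rw [← hcountU q hq2, ← hcountD q hq2]
      split <;> omega
  -- B side: products, gcd and exact division
  have hBfold := pvBfold ps 1 1
  have hNN : (UN.prod : Int) = U.prod := prod_map_toNat U hU2
  have hDNp : (DN.prod : Int) = D.prod := prod_map_toNat D hD2
  have hgcdval : Nat.gcd UN.prod DN.prod = ((↑UN : Multiset ℕ) ∩ ↑DN).prod := by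
    have := gcd_prime_products (↑UN) (↑DN) hUNprime hDNprime
    simpa [Multiset.prod_coe] using this
  have hipos : 0 < ((↑UN : Multiset ℕ) ∩ ↑DN).prod := inter_prod_pos _ _ hUNprime
  have hdivU : UN.prod / ((↑UN : Multiset ℕ) ∩ ↑DN).prod = mU.prod := by
    have := sub_prod_div (↑UN) (↑DN) hipos
    simpa [Multiset.prod_coe, hmU] using this
  have hdivD : DN.prod / ((↑UN : Multiset ℕ) ∩ ↑DN).prod = mD.prod := by
    have h' : 0 < ((↑DN : Multiset ℕ) ∩ ↑UN).prod := by
      rwa [Multiset.inter_comm]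
    have := sub_prod_div (↑DN) (↑UN) h'
    rw [Multiset.inter_comm] at this
    simpa [Multiset.prod_coe, hmD] using this
  -- now unfold both sides
  show pvAExpr ps = solution_alt ps
  unfold pvAExpr solution_alt
  simp only [hfold, hBfold]
  rw [outerA_fold _ _ _ (by norm_num) (by norm_num [pvMOD]),
      outerA_fold _ _ _ (by norm_num) (by norm_num [pvMOD])]
  have hnum : (1 : Int) * U.prod = (UN.prod : Int) := by rw [one_mul, hNN]
  have hden : (1 : Int) * D.prod = (DN.prod : Int) := by rw [one_mul, hDNp]
  rw [hnum, hden]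
  have hgl : pvGcdLoop (((DN.prod : Int)).toNat + 2) ((UN.prod : Int)) ((DN.prod : Int))
      = (Nat.gcd UN.prod DN.prod : Int) := by
    rw [pvGcdLoop_eq _ _ _ (Int.natCast_nonneg _) (Int.natCast_nonneg _) (by omega)]
    rw [Int.toNat_natCast, Int.toNat_natCast]
  rw [hgl, hgcdval]
  have hgpos : (0 : Int) < (((↑UN : Multiset ℕ) ∩ ↑DN).prod : Int) := by exact_mod_cast hipos
  rw [PySem.Int.floordiv_eq_ediv_of_pos hgpos, PySem.Int.floordiv_eq_ediv_of_pos hgpos]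
  rw [show ((UN.prod : Int)) / ((((↑UN : Multiset ℕ) ∩ ↑DN).prod : ℕ) : Int)
      = ((UN.prod / ((↑UN : Multiset ℕ) ∩ ↑DN).prod : ℕ) : Int) from
    (Int.natCast_ediv _ _).symm]
  rw [show ((DN.prod : Int)) / ((((↑UN : Multiset ℕ) ∩ ↑DN).prod : ℕ) : Int)
      = ((DN.prod / ((↑UN : Multiset ℕ) ∩ ↑DN).prod : ℕ) : Int) from
    (Int.natCast_ediv _ _).symm]
  rw [hdivU, hdivD]
  have hupEq : PySem.Int.mod (1 * pvProd (DWN.keys.foldl pvCancelStep (UPS, DWN)).1.keys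
        (fun p => (DWN.keys.foldl pvCancelStep (UPS, DWN)).1.getD p 0)) pvMOD
      = PySem.Int.mod ((mU.prod : ℕ) : Int) pvMOD := by
    rw [pvmod_emod, pvmod_emod, one_mul, pvProd_emod, hupKey]
  have hdownEq : PySem.Int.mod (1 * pvProd (DWN.keys.foldl pvCancelStep (UPS, DWN)).2.keys
        (fun p => (DWN.keys.foldl pvCancelStep (UPS, DWN)).2.getD p 0)) pvMOD
      = PySem.Int.mod ((mD.prod : ℕ) : Int) pvMOD := by
    rw [pvmod_emod, pvmod_emod, one_mul, pvProd_emod, hdownKey]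
  rw [hupEq, hdownEq]

-- ===== VERDICT (by name: the statement is the Claim_ definition above) =====
theorem solution_spec : Claim_equal_solution := by
  intro ps _
  unfold Spec_solution
  exact solution_eq ps
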